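-- pv_equiv track=rewrite | github.com/wangwei0239/hmm_kw | kw/train.py | get_all_keywrods
-- ===== SOURCE A (Python) =====
-- def get_all_keywrods(sentence, mark):
--     keywords = [[]]
--     for i, w in enumerate(sentence):
--         if mark[i] == "KS":
--             keywords.append([w])
--         elif mark[i] == "KB":
--             keywords.append([w])
--         elif mark[i] == "KM" or mark[i] == "KE":
--             keywords[-1].append(w)
--         else:
--             keywords.append([])
--     keywords = ["".join(k) for k in keywords if k]
--     return keywords
-- ===== SOURCE B (Python) =====
-- def get_all_keywrods(sentence, mark):
--     # Right-to-left scan: `pending` is the already-joined KM/KE continuation run that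
--     # starts right after the current position (None if there is none); finished
--     # keywords are prepended, so the result is built back-to-front.
--     keywords = []
--     pending = None
--     for w, m in zip(reversed(sentence), reversed(mark[:len(sentence)])):
--         if m == "KS" or m == "KB":
--             keywords.insert(0, w + (pending or ""))
--             pending = None
--         elif m == "KM" or m == "KE":
--             pending = w + (pending or "")
--         elif pending is not None:
--             keywords.insert(0, pending)
--             pending = None
--     if pending is not None:
--         keywords.insert(0, pending)
--     return keywords
-- ===== Notes on version B (the rewrite author's own statement) =====
-- stated objective: alternative
-- what changed: Replaces A's forward pass over a growing list of mutable groups (mutating keywords[-1], then a final filter+join comprehension) with a right-to-left scan over the zipped (char, tag) pairs that carries the already-joined KM/KE continuation run following the current position and prepends finished keywords, building the result back-to-front with no intermediate group lists.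
import Mathlib
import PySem

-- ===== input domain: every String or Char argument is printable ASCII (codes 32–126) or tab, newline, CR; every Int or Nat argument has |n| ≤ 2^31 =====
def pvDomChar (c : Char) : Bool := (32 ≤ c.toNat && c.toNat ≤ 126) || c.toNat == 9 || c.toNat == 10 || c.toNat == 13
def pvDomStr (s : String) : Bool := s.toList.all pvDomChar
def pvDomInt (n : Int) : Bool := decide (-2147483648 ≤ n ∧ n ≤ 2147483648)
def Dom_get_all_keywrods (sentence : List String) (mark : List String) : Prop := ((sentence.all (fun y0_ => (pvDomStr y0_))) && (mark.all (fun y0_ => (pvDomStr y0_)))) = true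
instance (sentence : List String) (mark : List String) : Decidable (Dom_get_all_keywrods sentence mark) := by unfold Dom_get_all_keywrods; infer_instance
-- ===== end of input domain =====

-- B replaces A's forward pass over a growing list of mutable groups by a right-to-left
-- scan that carries the joined KM/KE continuation run and prepends finished keywords
-- (objective: alternative decomposition, same cost). Return value only; no mutation.

-- ===== PORT A =====
-- A's `keywords` list is kept REVERSED (head = Python's keywords[-1]) so that
-- `keywords.append(x)` is `x :: kws` and `keywords[-1].append(w)` modifies the head;
-- the final comprehension reverses back. `mark[i]` is `pyGetD … ""` ("": falls to the
-- else-branch; inside Pre_ the index is always in range so the default is never used).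
def pvAJoin (k : List String) : String := PySem.Str.join "" k

def pvALoop (mark : List String) : List String → Int → List (List String) → List (List String)
  | [], _, kws => kws
  | w :: ws, i, kws =>
    if PySem.List.pyGetD mark i "" = "KS" then pvALoop mark ws (i + 1) ([w] :: kws)
    else if PySem.List.pyGetD mark i "" = "KB" then pvALoop mark ws (i + 1) ([w] :: kws)
    else if PySem.List.pyGetD mark i "" = "KM" ∨ PySem.List.pyGetD mark i "" = "KE" then
      match kws with
      | g :: rest => pvALoop mark ws (i + 1) ((g ++ [w]) :: rest)
      | [] => pvALoop mark ws (i + 1) kws   -- unreachable: kws starts nonempty and stays nonempty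
    else pvALoop mark ws (i + 1) ([] :: kws)

def get_all_keywrods (sentence : List String) (mark : List String) : List String :=
  ((pvALoop mark sentence 0 [[]]).reverse.filter (· ≠ [])).map pvAJoin

-- ===== PORT B =====
-- one step of Source B's loop body; state = (keywords, pending), pair = (w, m)
def pvBStep (st : List String × Option String) (p : String × String) : List String × Option String :=
  if p.2 = "KS" ∨ p.2 = "KB" then ((p.1 ++ st.2.getD "") :: st.1, none)
  else if p.2 = "KM" ∨ p.2 = "KE" then (st.1, some (p.1 ++ st.2.getD ""))
  else if st.2.isSome then (st.2.getD "" :: st.1, none)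
  else st

-- `for w, m in zip(reversed(sentence), reversed(mark[:len(sentence)]))` then the final flush
def get_all_keywrods_alt (sentence : List String) (mark : List String) : List String :=
  let st := (sentence.reverse.zip (PySem.List.slice mark (some 0) (some (sentence.length : Int))).reverse).foldl pvBStep ([], none)
  match st.2 with
  | some p => p :: st.1
  | none => st.1

-- ===== PRECONDITION & SPEC =====
-- Pre_ excludes only inputs where the Python A raises IndexError on mark[i]
-- (mark shorter than sentence).
def Pre_get_all_keywrods (sentence : List String) (mark : List String) : Prop :=
  sentence.length ≤ mark.length
instance (sentence : List String) (mark : List String) : Decidable (Pre_get_all_keywrods sentence mark) := by unfold Pre_get_all_keywrods; infer_instance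

def pvWitness_get_all_keywrods : List String × List String :=
  (["a", "b", "c", "d"], ["KB", "KE", "O", "KS"])

def Spec_get_all_keywrods (sentence : List String) (mark : List String) (out : List String) : Prop := out = get_all_keywrods_alt sentence mark
instance (sentence : List String) (mark : List String) (out : List String) : Decidable (Spec_get_all_keywrods sentence mark out) := by unfold Spec_get_all_keywrods; infer_instance

-- ===== CLAIM (what is proved, stated in full; the proofs are below) =====
def Claim_equal_get_all_keywrods : Prop := ∀ (sentence : List String) (mark : List String), Dom_get_all_keywrods sentence mark → Pre_get_all_keywrods sentence mark → Spec_get_all_keywrods sentence mark (get_all_keywrods sentence mark)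

-- ===== LEMMAS AND PROOFS =====
-- string facts about "".join and ++
theorem pv_chars_join_nil_sep (g : List (List Char)) : PySem.Chars.join [] g = g.flatten := by
  induction g with
  | nil => rfl
  | cons a g ih =>
    cases g with
    | nil => simp [PySem.Chars.join, List.intercalate]
    | cons b r =>
      unfold PySem.Chars.join List.intercalate at ih ⊢
      simp only [List.intersperse] at ih ⊢
      simp only [List.flatten_cons, List.nil_append] at ih ⊢
      rw [ih]

theorem pvAJoin_nil : pvAJoin [] = "" := rfl

theorem pvAJoin_singleton (w : String) : pvAJoin [w] = w := by
  simp [pvAJoin, PySem.Str.join]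

theorem pvAJoin_append_singleton (g : List String) (w : String) :
    pvAJoin (g ++ [w]) = pvAJoin g ++ w := by
  simp [pvAJoin, PySem.Str.join, pv_chars_join_nil_sep]

-- finish A's state: reverse, drop empty groups, join each
def pvFin (kws : List (List String)) : List String :=
  (kws.reverse.filter (· ≠ [])).map pvAJoin

theorem pvFin_cons (g : List String) (rest : List (List String)) :
    pvFin (g :: rest) = (if g ≠ [] then pvFin rest ++ [pvAJoin g] else pvFin rest) := by
  unfold pvFin
  by_cases h : g = [] <;> simp [h, List.filter_append]

-- B's scan, read right-to-left as a foldr over the (char, tag) pairs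
def pvK (ps : List (String × String)) : List String × Option String :=
  ps.foldr (fun p st => pvBStep st p) ([], none)

-- the keyword A's open group `g` plus B's pending run will produce (if any)
def pvOpt (g : List String) (pend : Option String) : List String :=
  match pend with
  | some p => [pvAJoin g ++ p]
  | none => if g = [] then [] else [pvAJoin g]

-- loop invariant: A's forward scan from state (g :: rest) at position i equals
-- B's backward result on the remaining (char, tag) pairs, glued through pvOpt
theorem pvK_cons (p : String × String) (ps : List (String × String)) :
    pvK (p :: ps) = pvBStep (pvK ps) p := rfl

-- loop invariant: A's forward scan from state (g :: rest) at position i equals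
-- B's backward result on the remaining (char, tag) pairs, glued through pvOpt
theorem pvMain (mark : List String) (ws : List String) :
    ∀ (i : Nat) (g : List String) (rest : List (List String)),
      i + ws.length ≤ mark.length →
      pvFin (pvALoop mark ws (i : Int) (g :: rest)) =
        pvFin rest ++ pvOpt g (pvK (ws.zip (mark.drop i))).2 ++ (pvK (ws.zip (mark.drop i))).1 := by
  induction ws with
  | nil =>
    intro i g rest _
    rw [pvALoop, pvFin_cons]
    simp only [List.zip_nil_left, pvK, List.foldr_nil, pvOpt]
    by_cases h : g = [] <;> simp [h]
  | cons w ws ih =>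
    intro i g rest hlen
    have hi : i < mark.length := by simp at hlen; omega
    have hdrop : mark.drop i = mark[i] :: mark.drop (i + 1) := List.drop_eq_getElem_cons hi
    have hget : PySem.List.pyGetD mark (i : Int) "" = mark[i] := by
      rw [PySem.List.pyGetD_natCast, List.getD_eq_getElem _ _ hi]
    have hcast : (i : Int) + 1 = ((i + 1 : Nat) : Int) := by push_cast; ring
    have ihlen : (i + 1) + ws.length ≤ mark.length := by simp at hlen ⊢; omega
    rw [hdrop, List.zip_cons_cons, pvK_cons]
    set st := pvK (ws.zip (mark.drop (i + 1))) with hst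
    rw [pvALoop, hget]
    by_cases hS : mark[i] = "KS"
    · rw [if_pos hS, hcast, ih (i + 1) [w] (g :: rest) ihlen, pvFin_cons, ← hst]
      by_cases hg : g = [] <;> cases hp : st.2 <;>
        simp [pvBStep, pvOpt, hS, hg, hp, pvAJoin_singleton, List.append_assoc]
    · rw [if_neg hS]
      by_cases hB : mark[i] = "KB"
      · rw [if_pos hB, hcast, ih (i + 1) [w] (g :: rest) ihlen, pvFin_cons, ← hst]
        by_cases hg : g = [] <;> cases hp : st.2 <;>
          simp [pvBStep, pvOpt, hB, hg, hp, pvAJoin_singleton, List.append_assoc]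
      · by_cases hM : mark[i] = "KM" ∨ mark[i] = "KE"
        · rw [if_neg hB, if_pos hM, hcast, ih (i + 1) (g ++ [w]) rest ihlen, ← hst]
          have hnotSB : ¬ (mark[i] = "KS" ∨ mark[i] = "KB") := by
            rintro (h | h); exacts [hS h, hB h]
          cases hp : st.2 <;>
            simp [pvBStep, pvOpt, hnotSB, hM, hp, pvAJoin_append_singleton, List.append_assoc, String.append_assoc]
        · have hnotSB : ¬ (mark[i] = "KS" ∨ mark[i] = "KB") := by
            rintro (h | h); exacts [hS h, hB h]
          rw [if_neg hB, if_neg hM, hcast, ih (i + 1) [] (g :: rest) ihlen, pvFin_cons, ← hst]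
          by_cases hg : g = [] <;> cases hp : st.2 <;>
            simp [pvBStep, pvOpt, hnotSB, hM, hg, hp, pvAJoin_nil, List.append_assoc]

-- reversing both lists before zipping reverses the zip (equal lengths)
theorem pv_zip_reverse {a b : Type} (xs : List a) (ys : List b) (h : xs.length = ys.length) :
    xs.reverse.zip ys.reverse = (xs.zip ys).reverse := by
  induction xs generalizing ys with
  | nil => cases ys with | nil => simp | cons y ys => simp at h
  | cons x xs ih =>
    cases ys with
    | nil => simp at h
    | cons y ys =>
      simp only [List.reverse_cons, List.zip_cons_cons]
      rw [List.zip_append (by simp; simpa using h), ih ys (by simpa using h)]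
      simp

-- under Pre_, zipping with mark[:len(sentence)] is zipping with mark
theorem pv_zip_take (sentence : List String) (mark : List String) :
    sentence.zip (mark.take sentence.length) = sentence.zip mark := by
  induction sentence generalizing mark with
  | nil => simp
  | cons w ws ih =>
    cases mark with
    | nil => simp
    | cons m ms => simp [List.zip_cons_cons, ih]

-- ===== VERDICT (by name: the statement is the Claim_ definition above) =====
theorem get_all_keywrods_spec : Claim_equal_get_all_keywrods := by
  intro sentence mark _ hpre
  unfold Spec_get_all_keywrods get_all_keywrods get_all_keywrods_alt
  have hslice : PySem.List.slice mark (some 0) (some (sentence.length : Int)) = mark.take sentence.length := by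
    rw [PySem.List.slice_zero_start, PySem.List.slice_to_natCast]
  have hpre' : sentence.length ≤ mark.length := hpre
  have hlen : sentence.length = (mark.take sentence.length).length := by
    simp; omega
  have hrev : sentence.reverse.zip (mark.take sentence.length).reverse
      = (sentence.zip (mark.take sentence.length)).reverse :=
    pv_zip_reverse _ _ hlen
  have hmain := pvMain mark sentence 0 [] [] (by simpa using hpre)
  simp only [List.drop_zero] at hmain
  have hA : pvFin (pvALoop mark sentence 0 [[]]) =
      pvOpt [] (pvK (sentence.zip mark)).2 ++ (pvK (sentence.zip mark)).1 := by
    simpa [pvFin] using hmain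
  rw [hslice, hrev, List.foldl_reverse, pv_zip_take]
  have hfold : (sentence.zip mark).foldr (fun x y => pvBStep y x) ([], none) = pvK (sentence.zip mark) := rfl
  rw [hfold]
  show pvFin (pvALoop mark sentence 0 [[]]) = _
  rw [hA]
  cases hp : (pvK (sentence.zip mark)).2 <;>
    simp [pvOpt, hp, pvAJoin_nil]
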